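-- pv_equiv track=rewrite | github.com/JokNavi/The-Triangular-numbers | V1s/V1.py | generate_bonus
-- ===== SOURCE A (Python) =====
-- import math
--
-- def generate_bonus(length):
--     output = [1]
--     for i in range(0, math.floor(length/3))[::3]:
--         next_value = output[i]+1
--         output.append(next_value)
--         output.append(next_value)
--         output.append(next_value+1)
--     return output[1:]
-- ===== SOURCE B (Python) =====
-- import math
--
--
-- def generate_bonus(length):
--     m = math.floor(length / 3)
--     blocks = (m + 2) // 3 if m > 0 else 0
--     return [v for k in range(blocks) for v in (2 * k + 2, 2 * k + 2, 2 * k + 3)]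
-- ===== Notes on version B (the rewrite author's own statement) =====
-- stated objective: simpler
-- what changed: Replaces the loop that appends to and reads back from the growing output list (with a [1] sentinel stripped at the end) by a closed-form block count and a flat comprehension computing each triple from its index.
import Mathlib
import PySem

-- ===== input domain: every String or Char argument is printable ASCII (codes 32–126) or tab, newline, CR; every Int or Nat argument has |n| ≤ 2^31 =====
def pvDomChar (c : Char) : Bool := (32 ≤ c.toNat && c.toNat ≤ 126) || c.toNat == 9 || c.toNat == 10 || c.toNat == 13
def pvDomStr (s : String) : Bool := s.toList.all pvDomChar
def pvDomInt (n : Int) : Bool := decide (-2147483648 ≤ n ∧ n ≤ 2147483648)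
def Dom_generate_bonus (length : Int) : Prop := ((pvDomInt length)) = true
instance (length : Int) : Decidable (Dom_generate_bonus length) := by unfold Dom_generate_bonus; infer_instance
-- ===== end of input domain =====

-- B computes each block of the sequence from its index in closed form instead of appending to
-- and reading back from the growing output list (and never prepends A's [1] sentinel).

-- ===== PORT A =====
-- math.floor(length/3) equals length // 3 exactly for the |length| ≤ 2^31 ints of Dom.
-- range(0, m)[::3] is the step-3 slice (step ≠ 0, so slice? is always some); output[i] is
-- always in range (i = 3k, len(output) = 3k+1 there), so the pyGetD default 0 is never read.
def generate_bonus (length : Int) : List Int :=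
  let m := PySem.Int.floordiv length 3
  let idxs := (PySem.List.slice? (PySem.List.pyRange 0 m 1) none none 3).getD []
  let output := idxs.foldl
    (fun output i =>
      let next_value := PySem.List.pyGetD output i 0 + 1
      output ++ [next_value, next_value, next_value + 1]) [1]
  PySem.List.slice output (some 1) none

-- ===== PORT B =====
def generate_bonus_alt (length : Int) : List Int :=
  let m := PySem.Int.floordiv length 3
  let blocks := if 0 < m then PySem.Int.floordiv (m + 2) 3 else 0
  (PySem.List.pyRange 0 blocks 1).flatMap (fun k => [2 * k + 2, 2 * k + 2, 2 * k + 3])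

-- ===== PRECONDITION & SPEC =====
def Spec_generate_bonus (length : Int) (out : List Int) : Prop := out = generate_bonus_alt length
instance (length : Int) (out : List Int) : Decidable (Spec_generate_bonus length out) := by unfold Spec_generate_bonus; infer_instance

-- ===== CLAIM (what is proved, stated in full; the proofs are below) =====
def Claim_equal_generate_bonus : Prop := ∀ (length : Int), Dom_generate_bonus length → Spec_generate_bonus length (generate_bonus length)

-- ===== LEMMAS AND PROOFS =====

/-- The flat block pattern: blocks 0..c-1, block k = [2k+2, 2k+2, 2k+3]. -/
def pvPat (c : Nat) : List Int :=
  (List.range c).flatMap (fun k : Nat => [2 * (k : Int) + 2, 2 * (k : Int) + 2, 2 * (k : Int) + 3])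

lemma pvPat_succ (c : Nat) :
    pvPat (c + 1) = pvPat c ++ [2 * (c : Int) + 2, 2 * (c : Int) + 2, 2 * (c : Int) + 3] := by
  simp [pvPat, List.range_succ]

lemma pvPat_length (c : Nat) : (pvPat c).length = 3 * c := by
  induction c with
  | zero => simp [pvPat]
  | succ c ih => rw [pvPat_succ]; simp [ih]; omega

lemma pvPat_getD (c : Nat) : (1 :: pvPat c).getD (3 * c) 0 = 2 * (c : Int) + 1 := by
  cases c with
  | zero => simp [pvPat]
  | succ c =>
    rw [pvPat_succ,
      show (1 :: (pvPat c ++ [2 * (c : Int) + 2, 2 * (c : Int) + 2, 2 * (c : Int) + 3]))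
        = (1 :: pvPat c) ++ [2 * (c : Int) + 2, 2 * (c : Int) + 2, 2 * (c : Int) + 3] from rfl]
    have hlen : (1 :: pvPat c).length = 3 * c + 1 := by simp [pvPat_length]
    rw [List.getD_eq_getElem?_getD, List.getElem?_append_right (by omega)]
    rw [show 3 * (c + 1) - (1 :: pvPat c).length = 2 from by omega]
    push_cast
    ring_nf
    rfl

/-- The loop of A over the index list [0, 3, …, 3(c-1)] builds 1 :: pvPat c. -/
lemma pvLoop (c : Nat) :
    ((List.range c).map (fun k : Nat => (3 * (k : Int)))).foldl
      (fun output i =>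
        let next_value := PySem.List.pyGetD output i 0 + 1
        output ++ [next_value, next_value, next_value + 1]) [1]
      = 1 :: pvPat c := by
  induction c with
  | zero => simp [pvPat]
  | succ c ih =>
    rw [List.range_succ, List.map_append, List.foldl_append, ih]
    simp only [List.map_cons, List.map_nil, List.foldl_cons, List.foldl_nil]
    rw [show (3 * (c : Int)) = ((3 * c : Nat) : Int) from by push_cast; ring,
      PySem.List.pyGetD_natCast]
    simp only [List.getD_eq_getElem?_getD] at *
    rw [show ((1 :: pvPat c)[(3 * c : Nat)]?).getD 0 = (1 :: pvPat c).getD (3 * c) 0 from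
        (List.getD_eq_getElem?_getD).symm,
      pvPat_getD, pvPat_succ]
    ring_nf
    simp

/-- The step-3 slice of range(0, m) is the map 3·k over range(blocks). -/
lemma pvSlice (m : Int) :
    (PySem.List.slice? (PySem.List.pyRange 0 m 1) none none 3).getD []
      = (List.range (if 0 < m then ((m.toNat + 2) / 3) else 0)).map
          (fun k : Nat => (3 * (k : Int))) := by
  simp only [PySem.List.slice?, PySem.List.sliceIndices]
  norm_num
  rw [show (if 0 < m then ((max m 0 + 3 - 1) / 3).toNat else 0)
        = (if 0 < m then ((m.toNat + 2) / 3) else 0) from by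
      by_cases hm : 0 < m
      · rw [if_pos hm, if_pos hm, max_eq_left (by omega)]; omega
      · rw [if_neg hm, if_neg hm]]
  set c := (if 0 < m then ((m.toNat + 2) / 3) else 0) with hc
  have hc3 : ∀ k, k ∈ List.range c → 3 * (k : Int) < m := by
    intro k hk
    rw [List.mem_range] at hk
    by_cases hm : 0 < m
    · rw [hc, if_pos hm] at hk; omega
    · rw [hc, if_neg hm] at hk; omega
  rw [List.filterMap_congr (g := fun k : Nat => some (3 * (k : Int)))
      (fun k hk => by rw [if_pos (hc3 k hk)]),
    show (fun k : Nat => some (3 * (k : Int))) = some ∘ (fun k : Nat => (3 * (k : Int))) from rfl,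
    List.filterMap_eq_map]

lemma pvAlt (length : Int) :
    generate_bonus_alt length
      = pvPat (if 0 < PySem.Int.floordiv length 3
               then (((PySem.Int.floordiv length 3).toNat + 2) / 3) else 0) := by
  show (PySem.List.pyRange 0
      (if 0 < PySem.Int.floordiv length 3
       then PySem.Int.floordiv (PySem.Int.floordiv length 3 + 2) 3 else 0) 1).flatMap
      (fun k => [2 * k + 2, 2 * k + 2, 2 * k + 3]) = _
  set m := PySem.Int.floordiv length 3 with hm
  by_cases h : 0 < m
  · rw [if_pos h, if_pos h]
    have hbv : (PySem.Int.floordiv (m + 2) 3).toNat = (m.toNat + 2) / 3 := by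
      rw [PySem.Int.floordiv_eq_ediv_of_pos (by omega)]; omega
    rw [PySem.List.pyRange_one 0 _, List.flatMap_map]
    rw [show (PySem.Int.floordiv (m + 2) 3 - 0).toNat = (m.toNat + 2) / 3 from by
      rw [← hbv]; congr 1; ring]
    simp [pvPat]
  · rw [if_neg h, if_neg h]
    simp [pvPat]

-- ===== VERDICT (by name: the statement is the Claim_ definition above) =====
theorem generate_bonus_spec : Claim_equal_generate_bonus := by
  intro length _
  unfold Spec_generate_bonus
  show PySem.List.slice
      (((PySem.List.slice? (PySem.List.pyRange 0 (PySem.Int.floordiv length 3) 1)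
          none none 3).getD []).foldl
        (fun output i =>
          let next_value := PySem.List.pyGetD output i 0 + 1
          output ++ [next_value, next_value, next_value + 1]) [1])
      (some 1) none = _
  rw [pvSlice, pvLoop, pvAlt, PySem.List.slice_from_one]
  rfl
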